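-- pv_equiv track=rewrite | github.com/paullinnerud/fonttools | Lib/fontTools/varLib/builder.py | _reorderItem
-- ===== SOURCE A (Python) =====
-- def _reorderItem(lst, narrows, zeroes):
-- 	out = []
-- 	count = len(lst)
-- 	for i in range(count):
-- 		if i not in narrows:
-- 			out.append(lst[i])
-- 	for i in range(count):
-- 		if i in narrows  and i not in zeroes:
-- 			out.append(lst[i])
-- 	return out
-- ===== SOURCE B (Python) =====
-- def _reorderItem(lst, narrows, zeroes):
--     first = []
--     second = []
--     for i, x in enumerate(lst):
--         if i not in narrows:
--             first.append(x)
--         elif i not in zeroes: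
--             second.append(x)
--     return first + second
-- ===== Notes on version B (the rewrite author's own statement) =====
-- stated objective: alternative
-- what changed: Replaces A's two separate index loops (each re-reading lst[i]) by a single enumerate pass that partitions elements into two accumulator lists and concatenates them at the end.
import Mathlib
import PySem

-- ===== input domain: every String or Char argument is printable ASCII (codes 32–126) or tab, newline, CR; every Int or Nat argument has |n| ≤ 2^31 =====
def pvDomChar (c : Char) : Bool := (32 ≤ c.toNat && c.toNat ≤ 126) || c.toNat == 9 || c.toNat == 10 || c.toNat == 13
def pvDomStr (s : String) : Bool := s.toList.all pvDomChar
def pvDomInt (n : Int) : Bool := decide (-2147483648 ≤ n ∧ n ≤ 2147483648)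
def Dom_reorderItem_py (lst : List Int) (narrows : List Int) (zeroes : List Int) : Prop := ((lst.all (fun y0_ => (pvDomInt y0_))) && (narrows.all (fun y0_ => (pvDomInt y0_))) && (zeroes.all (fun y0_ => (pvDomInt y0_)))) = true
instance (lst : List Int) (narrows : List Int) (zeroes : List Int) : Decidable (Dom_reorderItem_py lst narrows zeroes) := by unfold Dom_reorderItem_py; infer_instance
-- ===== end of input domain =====

-- B replaces A's two separate index loops by one enumerate pass that partitions
-- elements into two accumulator lists concatenated at the end (alternative decomposition).


-- ===== PORT A =====
-- lst[i] is ported as pyGetD lst i 0; i always lies in range(len(lst)), so it is exact.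
def reorderItem_py (lst : List Int) (narrows : List Int) (zeroes : List Int) : List Int :=
  let count : Int := lst.length
  let out : List Int :=
    (PySem.List.pyRange 0 count 1).foldl
      (fun out i => if !(narrows.contains i) then out ++ [PySem.List.pyGetD lst i 0] else out) []
  (PySem.List.pyRange 0 count 1).foldl
    (fun out i => if narrows.contains i && !(zeroes.contains i) then out ++ [PySem.List.pyGetD lst i 0] else out) out

-- ===== PORT B =====
def reorderItem_py_alt (lst : List Int) (narrows : List Int) (zeroes : List Int) : List Int :=
  let r : List Int × List Int :=
    (PySem.List.enumerate lst 0).foldl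
      (fun acc ix =>
        if !(narrows.contains ix.1) then (acc.1 ++ [ix.2], acc.2)
        else if !(zeroes.contains ix.1) then (acc.1, acc.2 ++ [ix.2])
        else acc)
      ([], [])
  r.1 ++ r.2

-- ===== PRECONDITION & SPEC =====
def Spec_reorderItem_py (lst : List Int) (narrows : List Int) (zeroes : List Int) (out : List Int) : Prop := out = reorderItem_py_alt lst narrows zeroes
instance (lst : List Int) (narrows : List Int) (zeroes : List Int) (out : List Int) : Decidable (Spec_reorderItem_py lst narrows zeroes out) := by unfold Spec_reorderItem_py; infer_instance

-- ===== CLAIM (what is proved, stated in full; the proofs are below) =====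
def Claim_equal_reorderItem_py : Prop := ∀ (lst : List Int) (narrows : List Int) (zeroes : List Int), Dom_reorderItem_py lst narrows zeroes → Spec_reorderItem_py lst narrows zeroes (reorderItem_py lst narrows zeroes)

-- ===== LEMMAS AND PROOFS =====

lemma pyGetD_succ (xs : List Int) (x : Int) (i : Int) (h : 1 ≤ i) (d : Int) :
    PySem.List.pyGetD (x::xs) i d = PySem.List.pyGetD xs (i-1) d := by
  simp only [PySem.List.pyGetD, PySem.List.pyGet?, PySem.List.pyIdx?]
  rw [if_pos (by omega : (0:Int) ≤ i), if_pos (by omega : (0:Int) ≤ i - 1)]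
  by_cases hle : i - 1 < (xs.length : Int)
  · rw [if_pos (by simp; omega), if_pos hle]
    have hi : i.toNat = (i-1).toNat + 1 := by omega
    rw [hi]; simp
  · rw [if_neg (by simp; omega), if_neg hle]; rfl

/-- B's single pass with a pair of accumulators computes the two filters. -/
lemma pairfold (p q : Int × Int → Bool) :
    ∀ (l : List (Int × Int)) (f s : List Int),
      l.foldl (fun acc ix =>
          if p ix then (acc.1 ++ [ix.2], acc.2)
          else if q ix then (acc.1, acc.2 ++ [ix.2]) else acc) (f, s)
      = (f ++ (l.filter p).map (·.2),
         s ++ (l.filter (fun ix => !p ix && q ix)).map (·.2)) := by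
  intro l
  induction l with
  | nil => intro f s; simp
  | cons a l ih =>
    intro f s
    by_cases hp : p a
    · simp [List.foldl_cons, hp, ih]
    · by_cases hq : q a
      · simp [List.foldl_cons, hp, hq, ih]
      · simp [List.foldl_cons, hp, hq, ih]

/-- Index-loop filters over range equal element filters over enumerate. -/
lemma enum_range (p : Int → Bool) :
    ∀ (lst : List Int) (s : Int),
      ((PySem.List.pyRange s (s + lst.length) 1).filter p).map
          (fun i => PySem.List.pyGetD lst (i - s) 0)
      = ((PySem.List.enumerate lst s).filter (fun ix => p ix.1)).map (·.2) := by
  intro lst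
  induction lst with
  | nil => intro s; simp [PySem.List.pyRange_one_eq_nil (le_refl s), PySem.List.enumerate_nil]
  | cons x xs ih =>
    intro s
    have harg : s + (((x::xs).length : Nat) : Int) = (s+1) + ((xs.length : Nat) : Int) := by
      push_cast [List.length_cons]; ring
    have hcons : PySem.List.pyRange s (s + ((x::xs).length : Int)) 1
        = s :: PySem.List.pyRange (s+1) ((s+1) + (xs.length : Int)) 1 := by
      rw [harg, PySem.List.pyRange_one_cons (by omega)]
    have htail :
        ((PySem.List.pyRange (s+1) ((s+1) + (xs.length : Int)) 1).filter p).map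
            (fun i => PySem.List.pyGetD (x::xs) (i - s) 0)
        = ((PySem.List.pyRange (s+1) ((s+1) + (xs.length : Int)) 1).filter p).map
            (fun i => PySem.List.pyGetD xs (i - (s+1)) 0) := by
      apply List.map_congr_left
      intro i hi
      have hmem : i ∈ PySem.List.pyRange (s+1) ((s+1) + (xs.length : Int)) 1 :=
        List.mem_of_mem_filter hi
      have hlb : s + 1 ≤ i := ((PySem.List.mem_pyRange_one).1 hmem).1
      rw [pyGetD_succ xs x (i - s) (by omega) 0]
      congr 1; omega
    rw [hcons, PySem.List.enumerate_cons]
    cases hp : p s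
    · simp only [List.filter_cons, hp, Bool.false_eq_true, reduceIte]
      rw [htail, ih (s+1)]
    · simp only [List.filter_cons, hp, reduceIte, List.map_cons]
      rw [htail, ih (s+1)]
      simp [PySem.List.pyGetD_zero_cons]

lemma side_A (lst narrows zeroes : List Int) :
    reorderItem_py lst narrows zeroes
    = ((PySem.List.enumerate lst 0).filter (fun ix => !(narrows.contains ix.1))).map (·.2)
      ++ ((PySem.List.enumerate lst 0).filter
            (fun ix => narrows.contains ix.1 && !(zeroes.contains ix.1))).map (·.2) := by
  unfold reorderItem_py
  rw [PySem.List.foldl_append_if, PySem.List.foldl_append_if]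
  have h0 : ∀ (p : Int → Bool),
      ((PySem.List.pyRange 0 (lst.length : Int) 1).filter p).map
          (fun i => PySem.List.pyGetD lst i 0)
      = ((PySem.List.enumerate lst 0).filter (fun ix => p ix.1)).map (·.2) := by
    intro p
    have := enum_range p lst 0
    simpa using this
  rw [h0, h0]
  simp

lemma side_B (lst narrows zeroes : List Int) :
    reorderItem_py_alt lst narrows zeroes
    = ((PySem.List.enumerate lst 0).filter (fun ix => !(narrows.contains ix.1))).map (·.2)
      ++ ((PySem.List.enumerate lst 0).filter
            (fun ix => narrows.contains ix.1 && !(zeroes.contains ix.1))).map (·.2) := by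
  unfold reorderItem_py_alt
  rw [pairfold (fun ix => !(narrows.contains ix.1)) (fun ix => !(zeroes.contains ix.1))]
  simp

-- ===== VERDICT (by name: the statement is the Claim_ definition above) =====
theorem reorderItem_py_spec : Claim_equal_reorderItem_py := by
  intro lst narrows zeroes _
  unfold Spec_reorderItem_py
  rw [side_A, side_B]
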